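-- pv_equiv track=rewrite | github.com/LenaWil/openteacher | modules/org/openteacher/ocr/wordListLoader/wordListLoader.py | _sortAndDetectRows
-- ===== SOURCE A (Python) =====
-- def _sortAndDetectRows(rects, margin):
-- 	rects = sorted(rects, key=lambda rect: rect["y"])
--
-- 	lastElement = None
-- 	rows = []
-- 	for rect in rects:
-- 		if lastElement and rect["y"] - lastElement["y"] < margin:
-- 			currentRow.append(rect)
-- 		else:
-- 			currentRow = [rect]
-- 			rows.append(currentRow)
-- 		lastElement = rect
-- 	return rows
-- ===== SOURCE B (Python) =====
-- def _sortAndDetectRows(rects, margin):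
--     rs = sorted(rects, key=lambda rect: rect["y"])
--     if not rs:
--         return []
--     n = len(rs)
--     breaks = [0] + [i for i in range(1, n) if rs[i]["y"] - rs[i - 1]["y"] >= margin] + [n]
--     return [rs[a:b] for a, b in zip(breaks, breaks[1:])]
-- ===== Notes on version B (the rewrite author's own statement) =====
-- stated objective: alternative
-- what changed: Replaces the running lastElement/currentRow accumulator loop with a two-phase decomposition: first compute the list of row-break indices (0, every i with rs[i]['y']-rs[i-1]['y'] >= margin, and n), then build the rows by slicing the sorted list between consecutive breakpoints.
import Mathlib
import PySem

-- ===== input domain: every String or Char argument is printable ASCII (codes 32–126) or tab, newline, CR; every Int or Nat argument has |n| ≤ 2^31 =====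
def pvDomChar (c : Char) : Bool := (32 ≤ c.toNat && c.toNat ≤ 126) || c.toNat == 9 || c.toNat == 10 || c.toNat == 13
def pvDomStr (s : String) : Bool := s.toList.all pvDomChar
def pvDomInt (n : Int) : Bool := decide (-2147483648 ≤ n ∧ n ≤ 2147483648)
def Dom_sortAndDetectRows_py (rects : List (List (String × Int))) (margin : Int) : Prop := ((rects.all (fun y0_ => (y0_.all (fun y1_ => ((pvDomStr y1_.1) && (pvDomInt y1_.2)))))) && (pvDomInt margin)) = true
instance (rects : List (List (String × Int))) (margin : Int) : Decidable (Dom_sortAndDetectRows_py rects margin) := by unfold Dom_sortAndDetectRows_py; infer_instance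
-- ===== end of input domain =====

-- B replaces A's running lastElement/currentRow accumulator loop by two phases: compute the
-- row-break indices, then slice the sorted list between consecutive breakpoints (alternative
-- decomposition, same O(n log n) cost).

-- ===== PORT A =====
-- rect["y"]: first matching entry of the association list (Python dict lookup).  The default 0
-- is never reached inside Pre_ (every rect carries the key "y", so Python's KeyError is excluded).
def pvYOf (r : List (String × Int)) : Int := (r.lookup "y").getD 0

-- A's for-loop; state: lastElement (Option) and the rows built so far, kept reversed with each
-- row reversed (currentRow is the head), reversed back when the loop ends.  'if lastElement'
-- is Option.some here: inside Pre_ every rect is a nonempty dict, so truthiness = not-None.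
def pvLoopA (margin : Int) : List (List (String × Int)) → Option (List (String × Int)) →
    List (List (List (String × Int))) → List (List (List (String × Int)))
  | [], _, racc => (racc.map List.reverse).reverse
  | rect :: rest, last, racc =>
    pvLoopA margin rest (some rect)
      (match last, racc with
       | some l, r :: rs =>
         if pvYOf rect - pvYOf l < margin then (rect :: r) :: rs else [rect] :: r :: rs
       | _, _ => [rect] :: racc)

def sortAndDetectRows_py (rects : List (List (String × Int))) (margin : Int) :
    List (List (List (String × Int))) :=
  pvLoopA margin (PySem.List.sorted rects pvYOf false) none []

-- ===== PORT B =====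
-- Source B: sort, compute breaks = [0] + [i in range(1,n) with gap >= margin] + [n], then slice.
def pvRowsB (margin : Int) (rs : List (List (String × Int))) : List (List (List (String × Int))) :=
  match rs with
  | [] => []
  | _ :: _ =>
    let n : Int := rs.length
    let breaks : List Int :=
      0 :: ((PySem.List.pyRange 1 n 1).filter
          (fun i => decide (margin ≤ pvYOf (PySem.List.pyGetD rs i []) - pvYOf (PySem.List.pyGetD rs (i-1) [])))) ++ [n]
    (breaks.zip breaks.tail).map (fun p => PySem.List.slice rs (some p.1) (some p.2))

def sortAndDetectRows_py_alt (rects : List (List (String × Int))) (margin : Int) :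
    List (List (List (String × Int))) :=
  pvRowsB margin (PySem.List.sorted rects pvYOf false)

-- ===== PRECONDITION & SPEC =====
-- Pre_ excludes exactly the inputs where Python A raises KeyError: a rect without the key "y".
def Pre_sortAndDetectRows_py (rects : List (List (String × Int))) (margin : Int) : Prop :=
  (rects.all (fun r => r.any (fun p => p.1 == "y"))) = true
instance (rects : List (List (String × Int))) (margin : Int) : Decidable (Pre_sortAndDetectRows_py rects margin) := by unfold Pre_sortAndDetectRows_py; infer_instance

def pvWitness_sortAndDetectRows_py : (List (List (String × Int))) × Int :=
  ([[("y", 10), ("x", 1)], [("y", 2)], [("y", 11)]], 3)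

def Spec_sortAndDetectRows_py (rects : List (List (String × Int))) (margin : Int) (out : List (List (List (String × Int)))) : Prop := out = sortAndDetectRows_py_alt rects margin
instance (rects : List (List (String × Int))) (margin : Int) (out : List (List (List (String × Int)))) : Decidable (Spec_sortAndDetectRows_py rects margin out) := by unfold Spec_sortAndDetectRows_py; infer_instance

-- ===== CLAIM (what is proved, stated in full; the proofs are below) =====
def Claim_equal_sortAndDetectRows_py : Prop := ∀ (rects : List (List (String × Int))) (margin : Int), Dom_sortAndDetectRows_py rects margin → Pre_sortAndDetectRows_py rects margin → Spec_sortAndDetectRows_py rects margin (sortAndDetectRows_py rects margin)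

-- ===== LEMMAS AND PROOFS =====

-- Intermediate characterisation: rows as a structural span recursion.
def pvSpan (margin : Int) (l : List (String × Int)) :
    List (List (String × Int)) → List (List (String × Int)) × List (List (String × Int))
  | [] => ([], [])
  | r :: rest =>
    if pvYOf r - pvYOf l < margin then
      let p := pvSpan margin r rest
      (r :: p.1, p.2)
    else ([], r :: rest)

theorem pvSpan_len (margin : Int) (l : List (String × Int)) (xs : List (List (String × Int))) :
    (pvSpan margin l xs).2.length ≤ xs.length := by
  induction xs generalizing l with
  | nil => simp [pvSpan]
  | cons r rest ih =>
    simp only [pvSpan]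
    split
    · exact le_trans (ih r) (by simp)
    · simp

def pvRows (margin : Int) : List (List (String × Int)) → List (List (List (String × Int)))
  | [] => []
  | r :: rest =>
    let p := pvSpan margin r rest
    (r :: p.1) :: pvRows margin p.2
termination_by xs => xs.length
decreasing_by
  have := pvSpan_len margin r rest
  simp at *; omega

theorem pvSpan_append (margin : Int) (l : List (String × Int)) (xs : List (List (String × Int))) :
    (pvSpan margin l xs).1 ++ (pvSpan margin l xs).2 = xs := by
  induction xs generalizing l with
  | nil => simp [pvSpan]
  | cons r rest ih =>
    simp only [pvSpan]
    split
    · simpa using ih r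
    · simp

theorem pvSpan_chain (margin : Int) (l : List (String × Int)) (xs : List (List (String × Int))) :
    List.IsChain (fun a b => pvYOf b - pvYOf a < margin) (l :: (pvSpan margin l xs).1) := by
  induction xs generalizing l with
  | nil => exact List.isChain_singleton l
  | cons r rest ih =>
    simp only [pvSpan]
    split
    · exact List.isChain_cons_cons.mpr ⟨by assumption, ih r⟩
    · exact List.isChain_singleton l

theorem pvSpan_break (margin : Int) (l : List (String × Int)) (xs : List (List (String × Int)))
    (x : List (String × Int)) (xs' : List (List (String × Int)))
    (h : (pvSpan margin l xs).2 = x :: xs') :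
    margin ≤ pvYOf x - pvYOf ((pvSpan margin l xs).1.getLastD l) := by
  induction xs generalizing l with
  | nil => simp [pvSpan] at h
  | cons r rest ih =>
    by_cases hlt : pvYOf r - pvYOf l < margin
    · simp only [pvSpan, if_pos hlt] at h ⊢
      rw [List.getLastD_cons]
      exact ih r h
    · simp only [pvSpan, if_neg hlt] at h ⊢
      simp at h
      obtain ⟨h1, h2⟩ := h
      subst h1
      simp
      omega

-- A's loop computes the span rows.
theorem pvLoopA_eq (margin : Int) (ys : List (List (String × Int)))
    (l : List (String × Int)) (curr : List (List (String × Int)))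
    (racc : List (List (List (String × Int)))) :
    pvLoopA margin ys (some l) (curr :: racc)
      = (racc.map List.reverse).reverse
        ++ (curr.reverse ++ (pvSpan margin l ys).1) :: pvRows margin (pvSpan margin l ys).2 := by
  induction ys generalizing l curr racc with
  | nil => simp [pvLoopA, pvSpan, pvRows]
  | cons r rest ih =>
    by_cases hlt : pvYOf r - pvYOf l < margin
    · simp only [pvLoopA, if_pos hlt]
      rw [ih r (r :: curr) racc]
      simp [pvSpan, if_pos hlt]
    · simp only [pvLoopA, if_neg hlt]
      rw [ih r [r] (curr :: racc)]
      simp only [pvSpan, if_neg hlt]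
      rw [pvRows]
      simp

theorem pvLoopA_rows (margin : Int) (ys : List (List (String × Int))) :
    pvLoopA margin ys none [] = pvRows margin ys := by
  cases ys with
  | nil => simp [pvLoopA, pvRows]
  | cons r rest =>
    show pvLoopA margin rest (some r) [[r]] = _
    rw [pvLoopA_eq]
    rw [pvRows]
    simp

-- Nat-indexed restatement of B: break positions, then take/drop slices.
def pvCondN (margin : Int) (ys : List (List (String × Int))) (i : Nat) : Bool :=
  decide (margin ≤ pvYOf (ys.getD i []) - pvYOf (ys.getD (i - 1) []))

def pvBsN (margin : Int) (ys : List (List (String × Int))) : List Nat :=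
  (List.range' 1 (ys.length - 1)).filter (pvCondN margin ys)

def pvSlices (ys : List (List (String × Int))) (l : List Nat) : List (List (List (String × Int))) :=
  (l.zip l.tail).map (fun p => (ys.drop p.1).take (p.2 - p.1))

def pvNatB (margin : Int) (ys : List (List (String × Int))) : List (List (List (String × Int))) :=
  match ys with
  | [] => []
  | _ :: _ => pvSlices ys (0 :: pvBsN margin ys ++ [ys.length])

theorem pvRowsB_eq_natB (margin : Int) (ys : List (List (String × Int))) :
    pvRowsB margin ys = pvNatB margin ys := by
  cases ys with
  | nil => rfl
  | cons r rest =>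
    simp only [pvRowsB, pvNatB]
    have hrange : PySem.List.pyRange 1 ((r :: rest).length : Int) 1
        = (List.range' 1 ((r :: rest).length - 1)).map (fun j : Nat => (j : Int)) := by
      rw [PySem.List.pyRange_one, List.range'_eq_map_range, List.map_map]
      have : (((r :: rest).length : Int) - 1).toNat = (r :: rest).length - 1 := by omega
      rw [this]
      apply List.map_congr_left
      intro k _
      show (1 : Int) + (k : Int) = ((1 + k : Nat) : Int)
      omega
    have hfilter : (PySem.List.pyRange 1 ((r :: rest).length : Int) 1).filter
          (fun i => decide (margin ≤ pvYOf (PySem.List.pyGetD (r :: rest) i [])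
            - pvYOf (PySem.List.pyGetD (r :: rest) (i-1) [])))
        = (pvBsN margin (r :: rest)).map (fun j : Nat => (j : Int)) := by
      rw [hrange, List.filter_map]
      unfold pvBsN
      congr 1
      apply List.filter_congr
      intro j hj
      have hj1 : 1 ≤ j := (List.mem_range'_1.mp hj).1
      have hcast : ((j : Int) - 1) = ((j - 1 : Nat) : Int) := by omega
      simp only [Function.comp_apply, PySem.List.pyGetD_natCast, hcast, pvCondN]
    rw [hfilter]
    have hbreaks : (0 : Int) :: (pvBsN margin (r :: rest)).map (fun j : Nat => (j : Int))
          ++ [((r :: rest).length : Int)]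
        = ((0 :: pvBsN margin (r :: rest) ++ [(r :: rest).length]).map (fun j : Nat => (j : Int))) := by
      simp
    rw [hbreaks]
    generalize (0 :: pvBsN margin (r :: rest) ++ [(r :: rest).length]) = L
    unfold pvSlices
    rw [← List.map_tail]
    rw [List.zip_map, List.map_map]
    apply List.map_congr_left
    intro p _
    cases p with
    | mk a b => simp [PySem.List.slice_natCast]

-- getD lemmas for the breakpoint characterisation.
theorem pvGetD_append_mid {α : Type} (l1 : List α) (x : α) (l2 : List α) (d : α) :
    (l1 ++ x :: l2).getD l1.length d = x := by
  simp [List.getD_eq_getElem?_getD]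

theorem pvGetD_last {α : Type} (l : List α) (a d : α) :
    (a :: l).getD l.length d = l.getLastD a := by
  induction l generalizing a with
  | nil => rfl
  | cons b t ih =>
    show (a :: b :: t).getD (t.length + 1) d = (b :: t).getLastD a
    rw [List.getD_cons_succ, List.getLastD_cons]
    exact ih b

theorem pvCond_false_lt (margin : Int) (ys row rem : List (List (String × Int)))
    (hsplit : row ++ rem = ys)
    (hchain : List.IsChain (fun a b => pvYOf b - pvYOf a < margin) row)
    (i : Nat) (h1 : 1 ≤ i) (hk : i < row.length) :
    pvCondN margin ys i = false := by
  have hrow : ∀ (j : Nat), j < row.length → ys.getD j [] = row.getD j [] := by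
    intro j hj
    rw [List.getD_eq_getElem?_getD, List.getD_eq_getElem?_getD, ← hsplit,
      List.getElem?_append_left hj]
  have hadj : ∀ j : Nat, j + 1 < row.length →
      pvYOf (row.getD (j + 1) []) - pvYOf (row.getD j []) < margin := by
    intro j hj
    have h := List.isChain_iff_getElem.mp hchain j hj
    rw [List.getD_eq_getElem _ _ hj, List.getD_eq_getElem _ _ (by omega)]
    exact h
  rw [pvCondN, hrow i hk, hrow (i - 1) (by omega)]
  have h := hadj (i - 1) (by omega)
  have he : i - 1 + 1 = i := by omega
  rw [he] at h
  simp only [decide_eq_false_iff_not, not_le]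
  omega

theorem pvCond_true_break (margin : Int) (r : List (String × Int))
    (rest : List (List (String × Int))) (x : List (String × Int))
    (xs' : List (List (String × Int)))
    (hrem : (pvSpan margin r rest).2 = x :: xs') :
    pvCondN margin (r :: rest) (r :: (pvSpan margin r rest).1).length = true := by
  have hsplit : (r :: (pvSpan margin r rest).1) ++ (x :: xs') = r :: rest := by
    rw [← hrem]; simpa using pvSpan_append margin r rest
  have hbreak := pvSpan_break margin r rest x xs' hrem
  rw [pvCondN]
  have h1 : (r :: rest).getD (r :: (pvSpan margin r rest).1).length [] = x := by
    rw [← hsplit]; exact pvGetD_append_mid ..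
  have h2 : (r :: rest).getD ((r :: (pvSpan margin r rest).1).length - 1) []
      = (pvSpan margin r rest).1.getLastD r := by
    have hpref : ∀ j, j < (r :: (pvSpan margin r rest).1).length →
        (r :: rest).getD j [] = (r :: (pvSpan margin r rest).1).getD j [] := by
      intro j hj
      rw [← hsplit, List.getD_eq_getElem?_getD, List.getD_eq_getElem?_getD,
        List.getElem?_append_left hj]
    rw [hpref _ (by simp)]
    have : (r :: (pvSpan margin r rest).1).length - 1 = (pvSpan margin r rest).1.length := by simp
    rw [this, pvGetD_last]
  rw [h1, h2]
  simpa using hbreak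

theorem pvCond_shift (margin : Int) (ys rem : List (List (String × Int))) (k : Nat)
    (hdrop : ys.drop k = rem) (j : Nat) (hj : 1 ≤ j) :
    pvCondN margin ys (k + j) = pvCondN margin rem j := by
  have hget : ∀ (i : Nat), ys.getD (k + i) [] = rem.getD i [] := by
    intro i
    rw [List.getD_eq_getElem?_getD, List.getD_eq_getElem?_getD, ← hdrop, List.getElem?_drop]
  have h1 : k + j - 1 = k + (j - 1) := by omega
  rw [pvCondN, pvCondN, hget j, h1, hget (j - 1)]

theorem pvSlices_cons0 (ys : List (List (String × Int))) (c : Nat) (t : List Nat) :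
    pvSlices ys (0 :: c :: t) = ys.take c :: pvSlices ys (c :: t) := by
  simp [pvSlices]

theorem pvSlices_shift (ys : List (List (String × Int))) (k : Nat) (l : List Nat) :
    pvSlices ys (l.map (fun j => k + j)) = pvSlices (ys.drop k) l := by
  induction l with
  | nil => rfl
  | cons a t ih =>
    cases t with
    | nil => rfl
    | cons b t' =>
      simp only [pvSlices, List.map_cons, List.zip_cons_cons, List.tail_cons,
        List.map_cons] at ih ⊢
      rw [List.drop_drop, show k + b - (k + a) = b - a from by omega, ih]

-- Breakpoint characterisation at the first row.
theorem pvBsN_char_nil (margin : Int) (r : List (String × Int))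
    (rest : List (List (String × Int))) (hrem : (pvSpan margin r rest).2 = []) :
    pvBsN margin (r :: rest) = [] := by
  have hsplit : (r :: (pvSpan margin r rest).1) ++ (pvSpan margin r rest).2 = r :: rest := by
    simpa using pvSpan_append margin r rest
  rw [hrem, List.append_nil] at hsplit
  rw [pvBsN]
  apply List.filter_eq_nil_iff.mpr
  intro i hi
  obtain ⟨h1, h2⟩ := List.mem_range'_1.mp hi
  have hklen : i < (r :: (pvSpan margin r rest).1).length := by
    rw [hsplit]; simp at h2 ⊢; omega
  rw [pvCond_false_lt margin (r :: rest) (r :: (pvSpan margin r rest).1) []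
    (by rw [List.append_nil]; exact hsplit) (pvSpan_chain margin r rest) i h1 hklen]
  simp

theorem pvBsN_char_cons (margin : Int) (r : List (String × Int))
    (rest : List (List (String × Int))) (x : List (String × Int))
    (xs' : List (List (String × Int))) (hrem : (pvSpan margin r rest).2 = x :: xs') :
    pvBsN margin (r :: rest)
      = (r :: (pvSpan margin r rest).1).length
          :: (pvBsN margin (x :: xs')).map
              (fun j => (r :: (pvSpan margin r rest).1).length + j) := by
  have hsplit : (r :: (pvSpan margin r rest).1) ++ x :: xs' = r :: rest := by
    rw [← hrem]; simpa using pvSpan_append margin r rest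
  have hk1 : 1 ≤ (r :: (pvSpan margin r rest).1).length := by simp
  have hlen : (r :: rest).length = (r :: (pvSpan margin r rest).1).length + (xs'.length + 1) := by
    rw [← hsplit]; simp only [List.length_append, List.length_cons]; try omega
  have hdropk : (r :: rest).drop (r :: (pvSpan margin r rest).1).length = x :: xs' := by
    rw [← hsplit]; exact List.drop_left ..
  have hrange : List.range' 1 ((r :: rest).length - 1)
      = List.range' 1 ((r :: (pvSpan margin r rest).1).length - 1)
        ++ List.range' (r :: (pvSpan margin r rest).1).length (xs'.length + 1) := by
    have h := @List.range'_append 1 ((r :: (pvSpan margin r rest).1).length - 1)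
      (xs'.length + 1) 1
    rw [show 1 + 1 * ((r :: (pvSpan margin r rest).1).length - 1)
        = (r :: (pvSpan margin r rest).1).length from by omega] at h
    rw [show (r :: rest).length - 1
        = ((r :: (pvSpan margin r rest).1).length - 1) + (xs'.length + 1) from by omega]
    exact h.symm
  rw [pvBsN, hrange, List.filter_append]
  have hfilter1 : (List.range' 1 ((r :: (pvSpan margin r rest).1).length - 1)).filter
      (pvCondN margin (r :: rest)) = [] := by
    apply List.filter_eq_nil_iff.mpr
    intro i hi
    obtain ⟨h1, h2⟩ := List.mem_range'_1.mp hi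
    rw [pvCond_false_lt margin (r :: rest) (r :: (pvSpan margin r rest).1) (x :: xs')
      hsplit (pvSpan_chain margin r rest) i h1 (by omega)]
    simp
  rw [hfilter1, List.nil_append, List.range'_succ]
  rw [List.filter_cons_of_pos (pvCond_true_break margin r rest x xs' hrem)]
  have hshift : List.range' ((r :: (pvSpan margin r rest).1).length + 1) xs'.length
      = (List.range' 1 xs'.length).map
          (fun j => (r :: (pvSpan margin r rest).1).length + j) := by
    rw [List.map_add_range']
  rw [hshift, List.filter_map]
  congr 1
  rw [pvBsN, show (x :: xs').length - 1 = xs'.length from by simp]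
  apply congrArg
  apply List.filter_congr
  intro j hj
  obtain ⟨hj1, _⟩ := List.mem_range'_1.mp hj
  show (pvCondN margin (r :: rest) ∘ fun j => (r :: (pvSpan margin r rest).1).length + j) j
    = pvCondN margin (x :: xs') j
  simp only [Function.comp_apply]
  exact pvCond_shift margin (r :: rest) (x :: xs') _ hdropk j hj1

theorem pvNatB_rows_aux (margin : Int) (n : Nat) :
    ∀ ys : List (List (String × Int)), ys.length ≤ n → pvNatB margin ys = pvRows margin ys := by
  induction n with
  | zero =>
    intro ys h
    have : ys = [] := List.eq_nil_of_length_eq_zero (Nat.le_zero.mp h)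
    rw [this, pvRows]; rfl
  | succ n ih =>
    intro ys hlen
    cases ys with
    | nil => rw [pvRows]; rfl
    | cons r rest =>
      have hsplit : (r :: (pvSpan margin r rest).1) ++ (pvSpan margin r rest).2 = r :: rest := by
        simpa using pvSpan_append margin r rest
      cases hrem : (pvSpan margin r rest).2 with
      | nil =>
        rw [hrem, List.append_nil] at hsplit
        rw [pvNatB, pvBsN_char_nil margin r rest hrem, pvRows]
        rw [hrem]
        show pvSlices (r :: rest) [0, (r :: rest).length]
          = (r :: (pvSpan margin r rest).1) :: pvRows margin []
        rw [pvRows]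
        simp [pvSlices, hsplit]
      | cons x xs' =>
        have hk1 : 1 ≤ (r :: (pvSpan margin r rest).1).length := by simp
        have hlenys : (r :: rest).length
            = (r :: (pvSpan margin r rest).1).length + (x :: xs').length := by
          rw [← hsplit, hrem]; simp only [List.length_append, List.length_cons]; try omega
        have hdropk : (r :: rest).drop (r :: (pvSpan margin r rest).1).length = x :: xs' := by
          rw [← hsplit, hrem]; exact List.drop_left ..
        have htakek : (r :: rest).take (r :: (pvSpan margin r rest).1).length
            = r :: (pvSpan margin r rest).1 := by
          rw [← hsplit, hrem]; exact List.take_left ..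
        rw [pvNatB, pvBsN_char_cons margin r rest x xs' hrem]
        have hstep : (0 : Nat) :: ((r :: (pvSpan margin r rest).1).length
              :: (pvBsN margin (x :: xs')).map
                  (fun j => (r :: (pvSpan margin r rest).1).length + j)) ++ [(r :: rest).length]
            = 0 :: ((0 :: pvBsN margin (x :: xs') ++ [(x :: xs').length]).map
                  (fun j => (r :: (pvSpan margin r rest).1).length + j)) := by
          simp [hlenys]
        have hmc : (0 :: pvBsN margin (x :: xs') ++ [(x :: xs').length]).map
              (fun j => (r :: (pvSpan margin r rest).1).length + j)
            = (r :: (pvSpan margin r rest).1).length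
              :: (pvBsN margin (x :: xs') ++ [(x :: xs').length]).map
                  (fun j => (r :: (pvSpan margin r rest).1).length + j) := by
          simp
        rw [hstep, hmc, pvSlices_cons0, htakek, ← hmc, pvSlices_shift, hdropk]
        have hrec : pvSlices (x :: xs') (0 :: pvBsN margin (x :: xs') ++ [(x :: xs').length])
            = pvNatB margin (x :: xs') := by rw [pvNatB]
        rw [hrec, ih (x :: xs') (by simp at hlenys hlen ⊢; omega)]
        conv_rhs => rw [pvRows]
        rw [hrem]

-- B computes the span rows too.
theorem pvRowsB_rows (margin : Int) (ys : List (List (String × Int))) :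
    pvRowsB margin ys = pvRows margin ys := by
  rw [pvRowsB_eq_natB, pvNatB_rows_aux margin ys.length ys (le_refl _)]

-- ===== VERDICT (by name: the statement is the Claim_ definition above) =====
theorem sortAndDetectRows_py_spec : Claim_equal_sortAndDetectRows_py := by
  intro rects margin _ _
  unfold Spec_sortAndDetectRows_py sortAndDetectRows_py sortAndDetectRows_py_alt
  rw [pvLoopA_rows, pvRowsB_rows]
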